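-- pv_equiv track=rewrite | github.com/andrewpmk/street-address | streetaddress/streetaddress.py | substitute_list
-- ===== SOURCE A (Python) =====
-- def substitute_list(pattern: list, replace: list, search: list):
--     if len(pattern) != len(replace):
--         raise ValueError  # Replacement list must be same as pattern list
--     if len(pattern) == 0: # Cannot use an empty list as a pattern
--         raise ValueError
--     if len(pattern) > len(search):
--         return search  # Nothing to replace since pattern/replace list is longer than list to search
--     search_index = 0 # The location in pattern that we are currently looking at
--     for i in range(len(search)):
--         # Match found
--         if search[i] == pattern[search_index]:
--             if search_index == len(pattern) - 1: # We have found the entire length of the pattern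
--                 # Replace the occurence of pattern with replace
--                 search = search[:i-search_index] + replace + search[i+1:]
--                 search_index = 0
--             else:
--                 search_index = search_index + 1
--         else:
--             # No match, reset search index and searching flag
--             search_index = 0
--     return search
-- ===== SOURCE B (Python) =====
-- def substitute_list(pattern: list, replace: list, search: list):
--     if len(pattern) != len(replace):
--         raise ValueError
--     if len(pattern) == 0:
--         raise ValueError
--     if len(pattern) > len(search):
--         return search
--     # Greedy jump scan: at each position take the common-prefix length of
--     # pattern and the remaining suffix; a full prefix is a match (emit replace,
--     # jump over it), otherwise copy through the first mismatching element.
--     # This reproduces A's non-backtracking automaton without any cross-iteration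
--     # state and without splicing the scanned list.
--     out = []
--     j, n, m = 0, len(search), len(pattern)
--     while j < n:
--         k = 0
--         while k < m and j + k < n and search[j + k] == pattern[k]:
--             k += 1
--         if k == m:
--             out += replace
--             j += m
--         else:
--             out += search[j:j + k + 1]
--             j += k + 1
--     return out
-- ===== Notes on version B (the rewrite author's own statement) =====
-- stated objective: alternative
-- what changed: A threads a cross-iteration automaton state through every index and splices the replacement into the list being scanned at each match; B keeps no state across steps: at each position it takes the common-prefix length of pattern and the remaining suffix, emits replace and jumps over a full match, or copies through the first mismatching element and jumps past it, building the output incrementally.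
import Mathlib
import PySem

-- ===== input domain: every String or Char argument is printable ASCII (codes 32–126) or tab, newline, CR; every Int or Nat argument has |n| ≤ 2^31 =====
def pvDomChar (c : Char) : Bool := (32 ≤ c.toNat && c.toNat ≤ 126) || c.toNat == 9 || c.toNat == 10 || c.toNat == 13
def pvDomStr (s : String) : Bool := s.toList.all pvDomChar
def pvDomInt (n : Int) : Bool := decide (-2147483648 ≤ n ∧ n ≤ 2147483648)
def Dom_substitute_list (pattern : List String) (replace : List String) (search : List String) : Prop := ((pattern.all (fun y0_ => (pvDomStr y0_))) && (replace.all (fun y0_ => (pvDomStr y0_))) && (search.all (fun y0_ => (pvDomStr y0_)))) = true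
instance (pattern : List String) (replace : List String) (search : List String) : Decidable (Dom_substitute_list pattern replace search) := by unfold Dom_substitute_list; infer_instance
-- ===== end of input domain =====

-- B replaces A's stateful scan-and-splice loop by a greedy jump scan: at each
-- position it measures the common-prefix length of pattern and the remaining
-- suffix, emitting replace on a full match or copying through the first
-- mismatch; this reproduces A's non-backtracking automaton exactly
-- (objective: alternative decomposition, same cost).

-- ===== PORT A =====
def substitute_list (pattern : List String) (replace : List String) (search : List String) : List String :=
  if pattern.length ≠ replace.length then []   -- Python raises ValueError here (excluded by Pre_)
  else if pattern.length = 0 then []           -- Python raises ValueError here (excluded by Pre_)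
  else if pattern.length > search.length then search
  else
    ((PySem.List.pyRange 0 (search.length : Int) 1).foldl
      (fun (st : List String × Nat) (i : Int) =>
        if PySem.List.pyGetD st.1 i "" = PySem.List.pyGetD pattern (st.2 : Int) "" then
          if st.2 = pattern.length - 1 then
            (PySem.List.slice st.1 none (some (i - (st.2 : Int))) ++ replace
              ++ PySem.List.slice st.1 (some (i + 1)) none, 0)
          else (st.1, st.2 + 1)
        else (st.1, 0))
      (search, 0)).1

-- ===== PORT B =====
-- length of the common prefix of the two lists (Source B's inner while loop)
def matchLen : List String → List String → Nat
  | p :: ps, s :: ss => if s = p then matchLen ps ss + 1 else 0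
  | _, _ => 0

-- Source B's outer while loop, as recursion on the remaining suffix of search;
-- the nonempty pattern is passed as head + tail so every step consumes ≥ 1 element
def goB (p0 : String) (ps replace : List String) : List String → List String
  | [] => []
  | x :: rest =>
    let k := matchLen (p0 :: ps) (x :: rest)
    if k = ps.length + 1 then replace ++ goB p0 ps replace (rest.drop ps.length)
    else (x :: rest).take (k + 1) ++ goB p0 ps replace (rest.drop k)
termination_by l => l.length
decreasing_by
  all_goals simp

def substitute_list_alt (pattern : List String) (replace : List String) (search : List String) : List String :=
  if pattern.length ≠ replace.length then []   -- Python raises ValueError here (excluded by Pre_)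
  else if pattern.length = 0 then []           -- Python raises ValueError here (excluded by Pre_)
  else if pattern.length > search.length then search
  else
    match pattern with
    | [] => []                                 -- unreachable: the empty pattern returned above
    | p0 :: ps => goB p0 ps replace search

-- ===== PRECONDITION & SPEC =====
-- Pre_ excludes exactly the inputs on which the Python raises ValueError:
-- a replace list of a different length than pattern, or an empty pattern.
def Pre_substitute_list (pattern : List String) (replace : List String) (search : List String) : Prop :=
  pattern.length = replace.length ∧ pattern ≠ []
instance (pattern : List String) (replace : List String) (search : List String) : Decidable (Pre_substitute_list pattern replace search) := by unfold Pre_substitute_list; infer_instance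

def pvWitness_substitute_list : List String × List String × List String :=
  (["a", "b"], ["x", "y"], ["c", "a", "b", "a"])

def Spec_substitute_list (pattern : List String) (replace : List String) (search : List String) (out : List String) : Prop := out = substitute_list_alt pattern replace search
instance (pattern : List String) (replace : List String) (search : List String) (out : List String) : Decidable (Spec_substitute_list pattern replace search out) := by unfold Spec_substitute_list; infer_instance

-- ===== CLAIM (what is proved, stated in full; the proofs are below) =====
def Claim_equal_substitute_list : Prop := ∀ (pattern : List String) (replace : List String) (search : List String), Dom_substitute_list pattern replace search → Pre_substitute_list pattern replace search → Spec_substitute_list pattern replace search (substitute_list pattern replace search)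

-- ===== LEMMAS AND PROOFS =====

-- Functional model of A's loop: the scanned list is acc ++ pattern.take si ++ rest throughout.
def goA (p r : List String) : List String → Nat → List String → List String
  | acc, si, [] => acc ++ p.take si
  | acc, si, x :: rest =>
    if x = p.getD si "" then
      if si = p.length - 1 then goA p r (acc ++ r) 0 rest
      else goA p r acc (si + 1) rest
    else goA p r (acc ++ p.take si ++ [x]) 0 rest

lemma A_loop (p r search : List String) (hp : p ≠ []) (hlen : p.length = r.length) :
    ∀ (rest : List String) (acc : List String) (si : Nat),
    si < p.length → (acc.length + si) + rest.length = search.length →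
    ((PySem.List.pyRange ((acc.length + si : Nat) : Int) (search.length : Int) 1).foldl
      (fun (st : List String × Nat) (i : Int) =>
        if PySem.List.pyGetD st.1 i "" = PySem.List.pyGetD p (st.2 : Int) "" then
          if st.2 = p.length - 1 then
            (PySem.List.slice st.1 none (some (i - (st.2 : Int))) ++ r
              ++ PySem.List.slice st.1 (some (i + 1)) none, 0)
          else (st.1, st.2 + 1)
        else (st.1, 0))
      (acc ++ p.take si ++ rest, si)).1 = goA p r acc si rest := by
  intro rest
  induction rest with
  | nil =>
    intro acc si hsip hlen'
    simp only [List.length_nil, Nat.add_zero] at hlen'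
    have : (PySem.List.pyRange ((acc.length + si : Nat) : Int) (search.length : Int) 1) = [] := by
      rw [PySem.List.pyRange_one]
      have : ((search.length : Int) - ((acc.length + si : Nat) : Int)).toNat = 0 := by omega
      rw [this]; rfl
    rw [this]
    simp [goA]
  | cons x rest' ih =>
    intro acc si hsip hlen'
    simp only [List.length_cons] at hlen'
    have hple : 1 ≤ p.length := List.length_pos_iff.mpr hp
    have htklen : (p.take si).length = si := by
      rw [List.length_take]; omega
    have hcons : (PySem.List.pyRange ((acc.length + si : Nat) : Int) (search.length : Int) 1)
        = ((acc.length + si : Nat) : Int) :: PySem.List.pyRange (((acc.length + si : Nat) : Int) + 1) (search.length : Int) 1 :=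
      PySem.List.pyRange_one_cons (by push_cast; omega)
    rw [hcons, List.foldl_cons]
    have hget1 : PySem.List.pyGetD (acc ++ p.take si ++ (x :: rest')) ((acc.length + si : Nat) : Int) "" = x := by
      rw [PySem.List.pyGetD_natCast]
      rw [List.getD_eq_getElem?_getD]
      rw [List.append_assoc, List.getElem?_append_right (by simp)]
      simp [htklen]
    have hget2 : PySem.List.pyGetD p ((si : Nat) : Int) "" = p.getD si "" := by
      rw [PySem.List.pyGetD_natCast]
    simp only [hget1, hget2, goA]
    split_ifs with h1 h2
    · -- full match: splice
      have e1 : PySem.List.slice (acc ++ p.take si ++ (x :: rest')) none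
          (some (((acc.length + si : Nat) : Int) - (si : Int))) = acc := by
        have hc : ((acc.length + si : Nat) : Int) - (si : Int) = ((acc.length : Nat) : Int) := by
          push_cast; omega
        rw [hc, PySem.List.slice_to_natCast, List.append_assoc, List.take_left]
      have hpre : (acc ++ p.take si ++ [x]).length = acc.length + si + 1 := by
        simp only [List.length_append, List.length_cons, List.length_nil, htklen]
      have e2 : PySem.List.slice (acc ++ p.take si ++ (x :: rest'))
          (some (((acc.length + si : Nat) : Int) + 1)) none = rest' := by
        have hc : ((acc.length + si : Nat) : Int) + 1 = ((acc.length + si + 1 : Nat) : Int) := by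
          push_cast; omega
        have hsr2 : (acc ++ p.take si ++ (x :: rest')) = (acc ++ p.take si ++ [x]) ++ rest' := by
          simp
        rw [hc, PySem.List.slice_from_natCast, hsr2, List.drop_left' hpre]
      rw [e1, e2]
      have hL2 : ((acc ++ r).length + 0) + rest'.length = search.length := by
        simp only [List.length_append]; omega
      have hib := ih (acc ++ r) 0 (by omega) hL2
      simp only [List.take_zero, List.append_nil, Nat.add_zero] at hib
      have hst : ((acc.length + si : Nat) : Int) + 1 = (((acc ++ r).length : Nat) : Int) := by
        simp only [List.length_append]; push_cast; omega
      rw [hst]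
      exact hib
    · -- partial match
      have hsip' : si + 1 < p.length := by omega
      have htk : p.take (si + 1) = p.take si ++ [x] := by
        rw [List.take_succ, List.getElem?_eq_getElem hsip]
        have : p[si] = p.getD si "" := by
          rw [List.getD_eq_getElem?_getD, List.getElem?_eq_getElem hsip]; rfl
        rw [this, ← h1]; rfl
      have hib := ih acc (si + 1) hsip' (by omega)
      rw [htk] at hib
      have hstate : acc ++ (p.take si ++ [x]) ++ rest' = acc ++ p.take si ++ (x :: rest') := by
        simp
      rw [hstate] at hib
      have hst : ((acc.length + si : Nat) : Int) + 1 = ((acc.length + (si + 1) : Nat) : Int) := by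
        push_cast; omega
      rw [hst]
      exact hib
    · -- mismatch
      have hlacc : (acc ++ p.take si ++ [x]).length = acc.length + si + 1 := by
        simp only [List.length_append, List.length_cons, List.length_nil, htklen]
      have hL3 : ((acc ++ p.take si ++ [x]).length + 0) + rest'.length = search.length := by
        rw [hlacc]; omega
      have hib := ih (acc ++ p.take si ++ [x]) 0 (by omega) hL3
      simp only [List.take_zero, List.append_nil, Nat.add_zero] at hib
      have hstate : (acc ++ p.take si ++ [x]) ++ rest' = acc ++ p.take si ++ (x :: rest') := by
        simp
      rw [hstate] at hib
      have hst : ((acc.length + si : Nat) : Int) + 1 = (((acc ++ p.take si ++ [x]).length : Nat) : Int) := by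
        rw [hlacc]; push_cast; omega
      rw [hst]
      exact hib

-- A's automaton run from state si, re-expressed as one greedy jump:
-- k = common-prefix length of (p.drop si) and s decides a full match,
-- exhaustion of s, or a skip past the first mismatch.
lemma stepA (p r : List String) :
    ∀ (s : List String) (si : Nat) (acc : List String), si < p.length →
    goA p r acc si s =
      (if si + matchLen (p.drop si) s = p.length then
        goA p r (acc ++ r) 0 (s.drop (p.length - si))
      else if matchLen (p.drop si) s = s.length then acc ++ p.take si ++ s
      else goA p r (acc ++ p.take si ++ s.take (matchLen (p.drop si) s + 1)) 0
        (s.drop (matchLen (p.drop si) s + 1))) := by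
  intro s
  induction s with
  | nil =>
    intro si acc hsi
    have h0 : matchLen (p.drop si) [] = 0 := by
      cases p.drop si <;> simp [matchLen]
    simp [goA, h0, Nat.ne_of_lt hsi]
  | cons x rest ih =>
    intro si acc hsi
    have hdrop : p.drop si = p[si] :: p.drop (si + 1) := by
      rw [List.drop_eq_getElem_cons hsi]
    have hgetD : p.getD si "" = p[si] := by
      rw [List.getD_eq_getElem?_getD, List.getElem?_eq_getElem hsi, Option.getD_some]
    by_cases hx : x = p.getD si ""
    · -- element matches
      have hm : matchLen (p.drop si) (x :: rest)
          = matchLen (p.drop (si + 1)) rest + 1 := by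
        have hx2 : x = p[si] := by rw [hx, hgetD]
        rw [hdrop]; simp [matchLen, hx2]
      by_cases hlast : si = p.length - 1
      · -- completed the pattern
        have hdrop1 : p.drop (si + 1) = [] := by
          apply List.drop_eq_nil_of_le; omega
        have hm1 : matchLen (p.drop si) (x :: rest) = 1 := by
          rw [hm, hdrop1]; cases rest <;> simp [matchLen]
        have hplen : p.length - si = 1 := by omega
        simp only [goA, if_pos hx, if_pos hlast, hm1, hplen]
        rw [if_pos (show si + 1 = p.length by omega)]
        simp
      · -- partial progress: use IH at si+1
        have hsi1 : si + 1 < p.length := by omega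
        have htk : p.take (si + 1) = p.take si ++ [x] := by
          rw [List.take_succ, List.getElem?_eq_getElem hsi]
          rw [hx, hgetD]; rfl
        simp only [goA, if_pos hx, if_neg hlast]
        rw [ih (si + 1) acc hsi1, hm]
        by_cases hc1 : si + 1 + matchLen (p.drop (si + 1)) rest = p.length
        · rw [if_pos hc1,
            if_pos (show si + (matchLen (p.drop (si + 1)) rest + 1) = p.length by omega)]
          have : p.length - si = (p.length - (si + 1)) + 1 := by omega
          rw [this, List.drop_succ_cons]
        · rw [if_neg hc1,
            if_neg (show ¬ si + (matchLen (p.drop (si + 1)) rest + 1) = p.length by omega)]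
          by_cases hc2 : matchLen (p.drop (si + 1)) rest = rest.length
          · rw [if_pos hc2,
              if_pos (show matchLen (p.drop (si + 1)) rest + 1 = (x :: rest).length by
                simp [List.length_cons]; omega)]
            rw [htk]; simp
          · rw [if_neg hc2,
              if_neg (show ¬ matchLen (p.drop (si + 1)) rest + 1 = (x :: rest).length by
                simp [List.length_cons]; omega)]
            rw [htk, List.drop_succ_cons]
            have htx : (x :: rest).take (matchLen (p.drop (si + 1)) rest + 1 + 1)
                = x :: rest.take (matchLen (p.drop (si + 1)) rest + 1) := by
              simp [List.take_succ_cons]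
            rw [htx]
            simp
    · -- mismatch at the first element
      have hx' : ¬ x = p[si] := by rw [← hgetD]; exact hx
      have hm0 : matchLen (p.drop si) (x :: rest) = 0 := by
        rw [hdrop]; simp [matchLen, hx']
      simp only [goA, if_neg hx, hm0]
      rw [if_neg (show ¬ si + 0 = p.length by omega),
        if_neg (show ¬ (0 : Nat) = (x :: rest).length by simp)]
      simp [List.take_succ_cons]

-- A's model equals B's greedy jump scan (induction on a length bound).
lemma AB (p0 : String) (ps r : List String) :
    ∀ (n : Nat) (s acc : List String), s.length ≤ n →
    goA (p0 :: ps) r acc 0 s = acc ++ goB p0 ps r s := by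
  intro n
  induction n with
  | zero =>
    intro s acc h
    have : s = [] := List.eq_nil_of_length_eq_zero (by omega)
    subst this
    simp [goA, goB]
  | succ n ih =>
    intro s acc h
    cases s with
    | nil => simp [goA, goB]
    | cons x rest =>
      rw [stepA (p0 :: ps) r (x :: rest) 0 acc (by simp)]
      simp only [List.drop_zero, List.take_zero, List.append_nil, Nat.zero_add, Nat.sub_zero, List.nil_append]
      rw [goB]
      simp only [List.length_cons] at h
      by_cases hc1 : matchLen (p0 :: ps) (x :: rest) = (p0 :: ps).length
      · rw [if_pos hc1]
        have hc1' : matchLen (p0 :: ps) (x :: rest) = ps.length + 1 := by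
          simpa using hc1
        rw [if_pos hc1']
        have hdropeq : (x :: rest).drop (p0 :: ps).length = rest.drop ps.length := by
          simp
        rw [hdropeq]
        rw [ih (rest.drop ps.length) (acc ++ r) (by simp; omega)]
        simp
      · rw [if_neg hc1]
        have hc1' : ¬ matchLen (p0 :: ps) (x :: rest) = ps.length + 1 := by
          simpa using hc1
        rw [if_neg hc1']
        by_cases hc2 : matchLen (p0 :: ps) (x :: rest) = (x :: rest).length
        · rw [if_pos hc2]
          have htk : (x :: rest).take (matchLen (p0 :: ps) (x :: rest) + 1) = x :: rest := by
            apply List.take_of_length_le; omega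
          have hdr : rest.drop (matchLen (p0 :: ps) (x :: rest)) = [] := by
            apply List.drop_eq_nil_of_le
            simp only [List.length_cons] at hc2; omega
          rw [htk, hdr]
          simp [goB]
        · rw [if_neg hc2]
          rw [ih ((x :: rest).drop (matchLen (p0 :: ps) (x :: rest) + 1))
            (acc ++ (x :: rest).take (matchLen (p0 :: ps) (x :: rest) + 1)) (by simp; omega)]
          simp

-- ===== VERDICT (by name: the statement is the Claim_ definition above) =====
theorem substitute_list_spec : Claim_equal_substitute_list := by
  intro pattern replace search _hdom hpre
  obtain ⟨hlen, hp⟩ := hpre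
  have hple : 0 < pattern.length := List.length_pos_iff.mpr hp
  unfold Spec_substitute_list substitute_list substitute_list_alt
  split_ifs with h1 h2 h3
  · rfl
  · rfl
  · rfl
  · -- main branch
    cases pattern with
    | nil => exact absurd rfl hp
    | cons p0 ps =>
      have hA := A_loop (p0 :: ps) replace search hp hlen search [] 0 hple (by simp)
      simp only [List.length_nil, Nat.zero_add, Nat.add_zero, Nat.cast_zero, List.take_zero,
        List.append_nil, List.nil_append] at hA
      rw [hA]
      rw [AB p0 ps replace search.length search [] (le_refl _)]
      simp
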